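-- pv_equiv track=rewrite | github.com/yesl-kim/algorithm-problem-solving | 프로그래머스/2/138476. 귤 고르기/귤 고르기.py | solution
-- ===== SOURCE A (Python) =====
-- from collections import Counter
--
-- def solution(k, tangerine):
--     total = 0
--     res = 0
--     for t, cnt in Counter(tangerine).most_common():
--         total += cnt
--         res += 1
--         if total >= k:
--             return res
-- ===== SOURCE B (Python) =====
-- from collections import Counter
--
-- def solution(k, tangerine):
--     counts = Counter(tangerine)
--     if not counts:
--         return None
--     freq = Counter(counts.values())
--     total = 0
--     res = 0
--     for c in range(max(counts.values()), 0, -1):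
--         for _ in range(freq.get(c, 0)):
--             total += c
--             res += 1
--             if total >= k:
--                 return res
-- ===== Notes on version B (the rewrite author's own statement) =====
-- stated objective: alternative
-- what changed: Replaces Counter.most_common()'s comparison sort of the (type,count) items with a counting-sort over the count axis: a frequency table of the counts plus one descending walk of count values from max down to 1 (measured ~1.2x, below the 1.5x bar, so no speed claim).
-- outside the precondition, e.g. on solution(5, [1]): A returns None, B returns None; on solution(0, []): A returns None, B returns None
import Mathlib
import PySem

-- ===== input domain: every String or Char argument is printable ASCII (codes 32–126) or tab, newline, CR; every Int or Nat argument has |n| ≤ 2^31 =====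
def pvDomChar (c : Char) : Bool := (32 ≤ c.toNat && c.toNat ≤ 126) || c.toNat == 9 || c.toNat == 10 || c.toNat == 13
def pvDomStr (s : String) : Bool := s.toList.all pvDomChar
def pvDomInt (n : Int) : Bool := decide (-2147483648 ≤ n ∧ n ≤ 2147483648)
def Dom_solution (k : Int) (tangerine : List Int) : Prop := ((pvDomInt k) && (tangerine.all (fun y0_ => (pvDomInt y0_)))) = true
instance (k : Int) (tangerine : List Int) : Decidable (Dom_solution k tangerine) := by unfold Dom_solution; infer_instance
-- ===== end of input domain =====

-- B replaces the comparison sort behind Counter.most_common() with a frequency table of the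
-- counts and one descending walk over count values (a counting-sort over counts); equivalence
-- of the returned value is proved on Pre_ (the inputs where A returns a number, not None).


-- ===== PORT A =====
-- the 'for t, cnt in …most_common():' loop; none = the Python fell through and returned None
def aLoop (k : Int) : Int → Int → List (Int × Int) → Option Int
  | _, _, [] => none
  | total, res, (_, cnt) :: rest =>
    if total + cnt ≥ k then some (res + 1) else aLoop k (total + cnt) (res + 1) rest

-- Counter(tangerine).most_common() = sorted(items, key=itemgetter(1), reverse=True) (stable)
def solution (k : Int) (tangerine : List Int) : Int :=
  (aLoop k 0 0
      (PySem.List.sorted (PySem.Dict.counter tangerine).items (fun p => p.2) true)).getD 0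

-- ===== PORT B =====
-- inner 'for _ in range(freq.get(c, 0)):' loop; returns (early result if any, total, res)
def bInner (k c : Int) : Nat → Int → Int → Option Int × Int × Int
  | 0, total, res => (none, total, res)
  | n + 1, total, res =>
    if total + c ≥ k then (some (res + 1), total + c, res + 1)
    else bInner k c n (total + c) (res + 1)

-- outer 'for c in range(max, 0, -1):' loop
def bOuter (k : Int) (freq : PySem.Dict Int Int) : List Int → Int → Int → Option Int
  | [], _, _ => none
  | c :: cs, total, res =>
    match bInner k c (freq.getD c 0).toNat total res with
    | (some r, _, _) => some r
    | (none, total', res') => bOuter k freq cs total' res'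

def solution_alt (k : Int) (tangerine : List Int) : Int :=
  let counts := PySem.Dict.counter tangerine
  if counts.items = [] then 0   -- 'if not counts: return None' (None is excluded by Pre_)
  else
    let freq := PySem.Dict.counter counts.values
    let m := (PySem.List.max? counts.values (fun v => v)).getD 0  -- counts nonempty, so max? is some
    (bOuter k freq (PySem.List.pyRange m 0 (-1)) 0 0).getD 0

-- ===== PRECONDITION & SPEC =====
-- Pre_ excludes exactly the inputs on which A (and B) fall off the loop and return None
-- instead of an int: empty tangerine, or k larger than the number of fruits.
def Pre_solution (k : Int) (tangerine : List Int) : Prop :=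
  tangerine ≠ [] ∧ k ≤ (tangerine.length : Int)
instance (k : Int) (tangerine : List Int) : Decidable (Pre_solution k tangerine) := by
  unfold Pre_solution; infer_instance

def pvWitness_solution : Int × List Int := (2, [1, 1, 2])

def Spec_solution (k : Int) (tangerine : List Int) (out : Int) : Prop := out = solution_alt k tangerine
instance (k : Int) (tangerine : List Int) (out : Int) : Decidable (Spec_solution k tangerine out) := by unfold Spec_solution; infer_instance

-- ===== CLAIM (what is proved, stated in full; the proofs are below) =====
def Claim_equal_solution : Prop := ∀ (k : Int) (tangerine : List Int), Dom_solution k tangerine → Pre_solution k tangerine → Spec_solution k tangerine (solution k tangerine)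

-- ===== LEMMAS AND PROOFS =====

-- both loops are the same scan over the list of per-type counts
def pvScan (k : Int) : Int → Int → List Int → Option Int
  | _, _, [] => none
  | total, res, c :: cs =>
    if total + c ≥ k then some (res + 1) else pvScan k (total + c) (res + 1) cs

lemma aLoop_eq_scan (k : Int) : ∀ (l : List (Int × Int)) (total res : Int),
    aLoop k total res l = pvScan k total res (l.map Prod.snd)
  | [], _, _ => rfl
  | (_, cnt) :: rest, total, res => by
    simp only [aLoop, List.map_cons, pvScan]
    split
    · rfl
    · exact aLoop_eq_scan k rest _ _

lemma pvScan_append (k : Int) : ∀ (xs ys : List Int) (total res : Int),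
    pvScan k total res (xs ++ ys) =
      match pvScan k total res xs with
      | some r => some r
      | none => pvScan k (total + xs.sum) (res + xs.length) ys
  | [], ys, total, res => by simp [pvScan]
  | x :: xs, ys, total, res => by
    simp only [List.cons_append, pvScan]
    split
    · rfl
    · rw [pvScan_append k xs ys]
      have h1 : total + x + xs.sum = total + (x :: xs).sum := by simp; ring
      have h2 : res + 1 + (xs.length : Int) = res + ((x :: xs).length : Int) := by
        simp; ring
      rw [h1, h2]

lemma bInner_fst (k c : Int) : ∀ (n : Nat) (total res : Int),
    (bInner k c n total res).1 = pvScan k total res (List.replicate n c)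
  | 0, _, _ => rfl
  | n + 1, total, res => by
    simp only [bInner, List.replicate_succ, pvScan]
    split
    · rfl
    · exact bInner_fst k c n _ _

lemma bInner_none (k c : Int) : ∀ (n : Nat) (total res : Int),
    (bInner k c n total res).1 = none →
    (bInner k c n total res).2 = (total + c * n, res + n)
  | 0, total, res, _ => by simp [bInner]
  | n + 1, total, res, h => by
    simp only [bInner] at h ⊢
    by_cases hc : total + c ≥ k
    · rw [if_pos hc] at h; simp at h
    · rw [if_neg hc] at h ⊢
      rw [bInner_none k c n _ _ h]
      simp only [Prod.mk.injEq]
      constructor <;> push_cast <;> ring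

lemma bOuter_eq_scan (k : Int) (freq : PySem.Dict Int Int) :
    ∀ (cs : List Int) (total res : Int),
    bOuter k freq cs total res =
      pvScan k total res (cs.flatMap fun c => List.replicate (freq.getD c 0).toNat c)
  | [], _, _ => rfl
  | c :: cs, total, res => by
    rw [List.flatMap_cons, pvScan_append]
    simp only [bOuter]
    rcases hb : bInner k c (freq.getD c 0).toNat total res with ⟨o, total', res'⟩
    have hf := bInner_fst k c (freq.getD c 0).toNat total res
    rw [hb] at hf
    cases o with
    | some r => rw [← hf]
    | none =>
      have hn := bInner_none k c (freq.getD c 0).toNat total res (by rw [hb])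
      rw [hb] at hn
      injection hn with hn1 hn2
      subst hn1; subst hn2
      dsimp only at hf ⊢
      rw [← hf]
      dsimp only
      rw [bOuter_eq_scan k freq cs]
      simp only [List.sum_replicate, List.length_replicate, nsmul_eq_mul]
      rw [mul_comm (((freq.getD c 0).toNat : Int)) c]

-- range(m, 0, -1) is m, m-1, …, 1
lemma pyRange_down (m : Int) :
    PySem.List.pyRange m 0 (-1) = (List.range m.toNat).map (fun i : Nat => m - (i : Int)) := by
  unfold PySem.List.pyRange
  rw [if_neg (by norm_num : ¬(-1 : Int) = 0)]
  simp only [if_neg (by norm_num : ¬(0:Int) < -1)]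
  by_cases h : 0 < m
  · rw [if_pos h]
    have h2 : (m - 0 + - -1 - 1) / - -1 = m := by norm_num
    rw [h2]
    exact List.map_congr_left fun i _ => by ring
  · rw [if_neg h]
    have : m.toNat = 0 := by omega
    simp [this]

lemma mem_pyRange_down {m x : Int} :
    x ∈ PySem.List.pyRange m 0 (-1) ↔ 1 ≤ x ∧ x ≤ m := by
  rw [pyRange_down]
  simp only [List.mem_map, List.mem_range]
  constructor
  · rintro ⟨i, hi, rfl⟩; omega
  · rintro ⟨h1, h2⟩; exact ⟨(m - x).toNat, by omega, by omega⟩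

lemma pairwise_gt_pyRange_down (m : Int) :
    (PySem.List.pyRange m 0 (-1)).Pairwise (· > ·) := by
  rw [pyRange_down]
  exact List.Pairwise.map _ (fun a b h => by omega) List.pairwise_lt_range

lemma count_flatMap_replicate (n : Int → Nat) (v : Int) :
    ∀ (cs : List Int), cs.Nodup →
      ((cs.flatMap fun c => List.replicate (n c) c).count v) = if v ∈ cs then n v else 0
  | [], _ => by simp
  | c :: cs, hnd => by
    rw [List.flatMap_cons, List.count_append, List.count_replicate,
      count_flatMap_replicate n v cs (List.Nodup.of_cons hnd)]
    by_cases hvc : v = c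
    · subst hvc
      have : v ∉ cs := (List.nodup_cons.mp hnd).1
      simp [this]
    · have hcv : ¬(c = v) := fun h => hvc h.symm
      simp [hvc, hcv, List.mem_cons]

lemma pairwise_ge_flatMap_replicate (n : Int → Nat) :
    ∀ (cs : List Int), cs.Pairwise (· > ·) →
      ((cs.flatMap fun c => List.replicate (n c) c).Pairwise (fun a b => b ≤ a))
  | [], _ => by simp
  | c :: cs, h => by
    rw [List.flatMap_cons, List.pairwise_append]
    obtain ⟨hc, hcs⟩ := List.pairwise_cons.mp h
    refine ⟨List.pairwise_replicate.mpr (Or.inr le_rfl),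
      pairwise_ge_flatMap_replicate n cs hcs, ?_⟩
    intro a ha b hb
    have ha' : a = c := List.eq_of_mem_replicate ha
    obtain ⟨c', hc', hb'⟩ := List.mem_flatMap.mp hb
    have hb2 : b = c' := List.eq_of_mem_replicate hb'
    rw [ha', hb2]
    exact le_of_lt (hc c' hc')

lemma pos_of_mem_counter_values (xs : List Int) {v : Int}
    (h : v ∈ (PySem.Dict.counter xs).values) : 0 < v := by
  have hv : (PySem.Dict.counter xs).values
      = (PySem.Dict.counter xs).items.map Prod.snd := rfl
  rw [hv, PySem.Dict.items_counter, List.map_map] at h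
  obtain ⟨kk, hkk, rfl⟩ := List.mem_map.mp h
  have : kk ∈ xs := (PySem.Set.mem_ofList xs kk).mp hkk
  simp only [Function.comp]
  exact_mod_cast List.count_pos_iff.mpr this

-- the heart: the descending count list A scans equals the bucket expansion B scans
lemma counts_list_eq (xs : List Int) (m : Int)
    (hm : PySem.List.max? (PySem.Dict.counter xs).values (fun v => v) = some m) :
    (PySem.List.sorted (PySem.Dict.counter xs).items (fun p => p.2) true).map Prod.snd
      = (PySem.List.pyRange m 0 (-1)).flatMap
          (fun c => List.replicate
            ((PySem.Dict.counter (PySem.Dict.counter xs).values).getD c 0).toNat c) := by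
  have hvals : (PySem.Dict.counter xs).values
      = (PySem.Dict.counter xs).items.map Prod.snd := rfl
  have hnd : (PySem.List.pyRange m 0 (-1)).Nodup :=
    (pairwise_gt_pyRange_down m).imp (fun h => ne_of_gt h)
  -- permutation of the left side with values
  have hLa : ((PySem.List.sorted (PySem.Dict.counter xs).items (fun p => p.2) true).map
      Prod.snd).Perm ((PySem.Dict.counter xs).values) := by
    rw [hvals]
    exact (PySem.List.sorted_perm _ _ _).map Prod.snd
  -- permutation of the right side with values
  have hLb : ((PySem.List.pyRange m 0 (-1)).flatMap
      (fun c => List.replicate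
        ((PySem.Dict.counter (PySem.Dict.counter xs).values).getD c 0).toNat c)).Perm
      ((PySem.Dict.counter xs).values) := by
    rw [List.perm_iff_count]
    intro v
    rw [count_flatMap_replicate _ v _ hnd]
    by_cases hv : v ∈ PySem.List.pyRange m 0 (-1)
    · rw [if_pos hv, PySem.Dict.getD_counter, Int.toNat_natCast]
    · rw [if_neg hv]
      symm
      rw [List.count_eq_zero]
      intro hmem
      apply hv
      rw [mem_pyRange_down]
      exact ⟨pos_of_mem_counter_values xs hmem,
        PySem.List.max?_isMax hm v hmem⟩
  -- both sides are descending
  have hsLa : ((PySem.List.sorted (PySem.Dict.counter xs).items (fun p => p.2) true).map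
      Prod.snd).Pairwise (fun a b => b ≤ a) :=
    (PySem.List.sorted_pairwise_rev _ _).map Prod.snd (fun a b h => h)
  have hsLb := pairwise_ge_flatMap_replicate
    (fun c => ((PySem.Dict.counter (PySem.Dict.counter xs).values).getD c 0).toNat)
    (PySem.List.pyRange m 0 (-1)) (pairwise_gt_pyRange_down m)
  exact List.Perm.eq_of_pairwise (fun a b _ _ h1 h2 => le_antisymm h2 h1)
    hsLa hsLb (hLa.trans hLb.symm)

-- ===== VERDICT (by name: the statement is the Claim_ definition above) =====
theorem solution_spec : Claim_equal_solution := by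
  intro k tangerine _hdom hpre
  obtain ⟨hne, _hk⟩ := hpre
  unfold Spec_solution
  -- counts is nonempty
  obtain ⟨a, t, rfl⟩ : ∃ a t, tangerine = a :: t := by
    cases tangerine with
    | nil => exact absurd rfl hne
    | cons a t => exact ⟨a, t, rfl⟩
  have hmem : a ∈ PySem.Set.ofList (a :: t) := (PySem.Set.mem_ofList (a :: t) a).mpr List.mem_cons_self
  have hitems : (PySem.Dict.counter (a :: t)).items ≠ [] := by
    rw [PySem.Dict.items_counter]
    intro h
    have hmm : (a, ((a :: t).count a : Int)) ∈
        List.map (fun j => (j, ((a :: t).count j : Int))) (PySem.Set.ofList (a :: t)) :=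
      List.mem_map_of_mem hmem
    rw [h] at hmm
    exact (List.not_mem_nil) hmm
  have hvne : (PySem.Dict.counter (a :: t)).values ≠ [] := by
    show (PySem.Dict.counter (a :: t)).items.map Prod.snd ≠ []
    simpa using hitems
  obtain ⟨m, hm⟩ : ∃ m,
      PySem.List.max? (PySem.Dict.counter (a :: t)).values (fun v => v) = some m := by
    cases h : PySem.List.max? (PySem.Dict.counter (a :: t)).values (fun v => v) with
    | none => exact absurd ((PySem.List.max?_eq_none_iff _ _).mp h) hvne
    | some m => exact ⟨m, rfl⟩
  simp only [solution, solution_alt]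
  rw [if_neg hitems, hm]
  simp only [Option.getD_some]
  rw [aLoop_eq_scan, bOuter_eq_scan, counts_list_eq (a :: t) m hm]
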